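-- pv_equiv track=rewrite | github.com/eunjuhyun88/WTD_2 | engine/research/pattern_search.py | _find_variant_ancestor_slug
-- ===== SOURCE A (Python) =====
-- def _find_variant_ancestor_slug(variant_slug: str, known_variant_slugs: list[str]) -> str | None:
--     if "__tf-" in variant_slug or "__dur-" in variant_slug:
--         return None
--     candidates = [
--         candidate
--         for candidate in known_variant_slugs
--         if candidate != variant_slug
--         and "__tf-" not in candidate
--         and "__dur-" not in candidate
--         and variant_slug.startswith(f"{candidate}__")
--     ]
--     if not candidates:
--         return None
--     return max(candidates, key=len)
-- ===== SOURCE B (Python) =====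
-- def _find_variant_ancestor_slug(variant_slug: str, known_variant_slugs: list[str]) -> str | None:
--     if "__tf-" in variant_slug or "__dur-" in variant_slug:
--         return None
--     known = set(known_variant_slugs)
--     for i in range(len(variant_slug) - 2, -1, -1):
--         if variant_slug[i:i + 2] == "__" and variant_slug[:i] in known:
--             return variant_slug[:i]
--     return None
-- ===== Notes on version B (the rewrite author's own statement) =====
-- stated objective: alternative
-- what changed: Instead of filtering the whole known-slug list with startswith and taking max by length, B builds a set of known slugs once and scans variant_slug's '__' boundaries from the longest prefix down, returning the first prefix found in the set.
import Mathlib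
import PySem

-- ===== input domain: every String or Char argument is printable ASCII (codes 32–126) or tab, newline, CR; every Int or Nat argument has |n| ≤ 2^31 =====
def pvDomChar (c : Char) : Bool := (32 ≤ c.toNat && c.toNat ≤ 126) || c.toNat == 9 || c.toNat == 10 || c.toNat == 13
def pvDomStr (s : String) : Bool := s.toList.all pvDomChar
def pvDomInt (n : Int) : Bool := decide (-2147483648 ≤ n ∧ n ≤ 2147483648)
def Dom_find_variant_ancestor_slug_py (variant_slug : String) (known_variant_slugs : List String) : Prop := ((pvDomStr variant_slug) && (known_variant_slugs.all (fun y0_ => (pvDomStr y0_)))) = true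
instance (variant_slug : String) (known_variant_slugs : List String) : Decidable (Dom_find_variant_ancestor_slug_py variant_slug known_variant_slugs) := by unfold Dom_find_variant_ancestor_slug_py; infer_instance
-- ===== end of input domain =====

-- B replaces A's filter-the-known-list-with-startswith-then-max-by-length by a set of known slugs plus a
-- longest-first scan over the '__' boundaries of variant_slug (alternative decomposition, same result).

-- ===== PORT A =====
def find_variant_ancestor_slug_py (variant_slug : String) (known_variant_slugs : List String) : Option String :=
  if PySem.Str.isIn "__tf-" variant_slug || PySem.Str.isIn "__dur-" variant_slug then none
  else
    let candidates := known_variant_slugs.filter (fun candidate =>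
      candidate != variant_slug &&
      !PySem.Str.isIn "__tf-" candidate &&
      !PySem.Str.isIn "__dur-" candidate &&
      PySem.Str.startswith variant_slug (candidate ++ "__"))
    if candidates.isEmpty then none
    else PySem.List.max? candidates PySem.Str.len

-- ===== PORT B =====
def find_variant_ancestor_slug_py_alt (variant_slug : String) (known_variant_slugs : List String) : Option String :=
  if PySem.Str.isIn "__tf-" variant_slug || PySem.Str.isIn "__dur-" variant_slug then none
  else
    let known : PySem.Set String := PySem.Set.ofList known_variant_slugs
    (PySem.List.pyRange (PySem.Str.len variant_slug - 2) (-1) (-1)).findSome? (fun i =>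
      if PySem.Str.slice variant_slug (some i) (some (i + 2)) == "__" &&
         PySem.Set.contains known (PySem.Str.slice variant_slug none (some i))
      then some (PySem.Str.slice variant_slug none (some i)) else none)

-- ===== PRECONDITION & SPEC =====
def Spec_find_variant_ancestor_slug_py (variant_slug : String) (known_variant_slugs : List String) (out : Option String) : Prop := out = find_variant_ancestor_slug_py_alt variant_slug known_variant_slugs
instance (variant_slug : String) (known_variant_slugs : List String) (out : Option String) : Decidable (Spec_find_variant_ancestor_slug_py variant_slug known_variant_slugs out) := by unfold Spec_find_variant_ancestor_slug_py; infer_instance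

-- ===== CLAIM (what is proved, stated in full; the proofs are below) =====
def Claim_equal_find_variant_ancestor_slug_py : Prop := ∀ (variant_slug : String) (known_variant_slugs : List String), Dom_find_variant_ancestor_slug_py variant_slug known_variant_slugs → Spec_find_variant_ancestor_slug_py variant_slug known_variant_slugs (find_variant_ancestor_slug_py variant_slug known_variant_slugs)

-- ===== LEMMAS AND PROOFS =====

-- the essential part of A's candidate test: variant_slug starts with candidate + "__"
def pvGood (v c : String) : Bool := PySem.Str.startswith v (c ++ "__")

lemma pvToList_uu : ("__" : String).toList = ['_', '_'] := by decide

lemma pvGood_iff (v c : String) : pvGood v c = true ↔ (c.toList ++ ['_', '_']) <+: v.toList := by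
  unfold pvGood
  rw [PySem.Str.startswith_eq, PySem.Chars.startswith_iff, String.toList_append, pvToList_uu]

-- under the guard, A's four-conjunct filter collapses to pvGood
lemma pvFilter_eq (v : String) (ks : List String)
    (hg : (PySem.Str.isIn "__tf-" v || PySem.Str.isIn "__dur-" v) = false) :
    ks.filter (fun candidate =>
      candidate != v &&
      !PySem.Str.isIn "__tf-" candidate &&
      !PySem.Str.isIn "__dur-" candidate &&
      PySem.Str.startswith v (candidate ++ "__")) = ks.filter (pvGood v) := by
  apply List.filter_congr
  intro c _hc
  rw [Bool.or_eq_false_iff] at hg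
  by_cases hs : pvGood v c = true
  · have hpre := (pvGood_iff v c).mp hs
    have hcpre : c.toList <+: v.toList := (List.prefix_append c.toList ['_', '_']).trans hpre
    have hne : (c != v) = true := by
      simp only [bne_iff_ne, ne_eq]
      rintro rfl
      have := hpre.length_le
      simp at this
    have htf : PySem.Str.isIn "__tf-" c = false := by
      by_contra h
      have h' : PySem.Str.isIn "__tf-" c = true := by simpa using h
      have hin : ("__tf-" : String).toList <:+: v.toList :=
        ((PySem.Str.isIn_iff_infix _ _).mp h').trans hcpre.isInfix
      rw [← PySem.Str.isIn_iff_infix] at hin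
      rw [hg.1] at hin
      exact Bool.false_ne_true hin
    have hdur : PySem.Str.isIn "__dur-" c = false := by
      by_contra h
      have h' : PySem.Str.isIn "__dur-" c = true := by simpa using h
      have hin : ("__dur-" : String).toList <:+: v.toList :=
        ((PySem.Str.isIn_iff_infix _ _).mp h').trans hcpre.isInfix
      rw [← PySem.Str.isIn_iff_infix] at hin
      rw [hg.2] at hin
      exact Bool.false_ne_true hin
    have hs' : PySem.Str.startswith v (c ++ "__") = true := hs
    rw [hne, htf, hdur, hs', hs]
    rfl
  · have hsf : pvGood v c = false := by
      simpa using hs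
    have hs' : PySem.Str.startswith v (c ++ "__") = false := hsf
    rw [hs', hsf]
    simp

-- if B's loop test passes at i, then v[:i] is a candidate of A, of length i
lemma pvCond_mem (v : String) (ks : List String) (i : Int) (h0 : 0 ≤ i)
    (h2 : (PySem.Str.slice v (some i) (some (i + 2)) == ("__" : String)) = true)
    (hk : PySem.Set.contains (PySem.Set.ofList ks) (PySem.Str.slice v none (some i)) = true) :
    PySem.Str.slice v none (some i) ∈ ks.filter (pvGood v) ∧
    PySem.Str.len (PySem.Str.slice v none (some i)) = i := by
  have htl2 : (PySem.Str.slice v (some i) (some (i + 2))).toList = (v.toList.drop i.toNat).take 2 := by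
    rw [PySem.Str.toList_slice, PySem.Chars.slice_eq_listSlice,
      PySem.List.slice_toNat _ h0 (by omega)]
    congr 1
    omega
  have hsl2 : (v.toList.drop i.toNat).take 2 = ['_', '_'] := by
    rw [← htl2, beq_iff_eq.mp h2, pvToList_uu]
  have hilen : i.toNat + 2 ≤ v.toList.length := by
    have hl := congrArg List.length hsl2
    rw [List.length_take, List.length_drop] at hl
    simp only [List.length_cons, List.length_nil] at hl
    omega
  have hptl : (PySem.Str.slice v none (some i)).toList = v.toList.take i.toNat := by
    rw [PySem.Str.toList_slice, PySem.Chars.slice_eq_listSlice, PySem.List.slice_to _ h0]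
  have hmem : PySem.Str.slice v none (some i) ∈ ks := by
    rw [PySem.Set.contains] at hk
    exact (PySem.Set.mem_ofList ks _).mp (by simpa using hk)
  have hgood : pvGood v (PySem.Str.slice v none (some i)) = true := by
    rw [pvGood_iff, hptl]
    obtain ⟨t, ht⟩ : ['_', '_'] <+: v.toList.drop i.toNat := hsl2 ▸ List.take_prefix 2 _
    exact ⟨t, by rw [List.append_assoc, ht, List.take_append_drop]⟩
  refine ⟨List.mem_filter.mpr ⟨hmem, hgood⟩, ?_⟩
  rw [PySem.Str.len_eq, hptl, List.length_take]
  omega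

-- first-hit of a countdown loop: if f fires at i0 and at nothing above i0, the scan returns f i0
lemma pvFindDesc {α : Type} (f : Int → Option α) (i0 : Int) (h0 : 0 ≤ i0) (r : α)
    (hf : f i0 = some r) :
    ∀ (k : Nat) (a : Int), a = i0 + k → (∀ j, i0 < j → j ≤ a → f j = none) →
      (PySem.List.pyRange a (-1) (-1)).findSome? f = some r := by
  intro k
  induction k with
  | zero =>
    intro a ha _hn
    have : a = i0 := by omega
    subst this
    rw [PySem.List.pyRange_neg_one_cons (by omega)]
    simp [hf]
  | succ k ih =>
    intro a ha hn
    rw [PySem.List.pyRange_neg_one_cons (by omega)]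
    rw [List.findSome?_cons, hn a (by omega) le_rfl]
    exact ih (a - 1) (by omega) (fun j hj1 hj2 => hn j hj1 (by omega))

-- ===== VERDICT (by name: the statement is the Claim_ definition above) =====
theorem find_variant_ancestor_slug_py_spec : Claim_equal_find_variant_ancestor_slug_py := by
  intro v ks _hdom
  unfold Spec_find_variant_ancestor_slug_py find_variant_ancestor_slug_py find_variant_ancestor_slug_py_alt
  by_cases hg : (PySem.Str.isIn "__tf-" v || PySem.Str.isIn "__dur-" v) = true
  · simp only [hg]
    rfl
  · have hg' : (PySem.Str.isIn "__tf-" v || PySem.Str.isIn "__dur-" v) = false := by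
      simpa using hg
    simp only [hg', Bool.false_eq_true, if_false]
    rw [pvFilter_eq v ks hg']
    by_cases hfe : ks.filter (pvGood v) = []
    · rw [hfe]
      simp only [List.isEmpty_nil, if_true]
      symm
      rw [List.findSome?_eq_none_iff]
      intro i hi
      rw [PySem.List.mem_pyRange_neg_one] at hi
      by_cases hc : (PySem.Str.slice v (some i) (some (i + 2)) == ("__" : String) &&
          PySem.Set.contains (PySem.Set.ofList ks) (PySem.Str.slice v none (some i))) = true
      · exfalso
        rw [Bool.and_eq_true] at hc
        have := (pvCond_mem v ks i (by omega) hc.1 hc.2).1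
        rw [hfe] at this
        simp at this
      · exact if_neg hc
    · have hfe' : (ks.filter (pvGood v)).isEmpty = false := by
        simpa [List.isEmpty_iff] using hfe
      simp only [hfe', Bool.false_eq_true, if_false]
      obtain ⟨m, hm⟩ : ∃ m, PySem.List.max? (ks.filter (pvGood v)) PySem.Str.len = some m := by
        cases h : PySem.List.max? (ks.filter (pvGood v)) PySem.Str.len with
        | none => exact absurd ((PySem.List.max?_eq_none_iff _ _).mp h) hfe
        | some m => exact ⟨m, rfl⟩
      rw [hm]
      have hmem := PySem.List.max?_mem hm
      have hmax := PySem.List.max?_isMax hm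
      obtain ⟨hmks, hmg⟩ := List.mem_filter.mp hmem
      obtain ⟨t, hw⟩ := (pvGood_iff v m).mp hmg
      -- hw : (m.toList ++ ['_','_']) ++ t = v.toList
      have hvlen : v.toList.length = m.toList.length + 2 + t.length := by
        rw [← hw]
        simp only [List.length_append, List.length_cons, List.length_nil]
      have htake : v.toList.take m.toList.length = m.toList := by
        rw [← hw, List.append_assoc]
        exact List.take_left
      have hdrop : v.toList.drop m.toList.length = '_' :: '_' :: t := by
        rw [← hw, List.append_assoc]
        exact List.drop_left
      have hsliceP : PySem.Str.slice v none (some (m.toList.length : Int)) = m := by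
        apply String.toList_inj.mp
        rw [PySem.Str.toList_slice, PySem.Chars.slice_eq_listSlice,
          PySem.List.slice_to _ (Int.natCast_nonneg _)]
        simpa using htake
      have hslice2 : PySem.Str.slice v (some (m.toList.length : Int))
          (some ((m.toList.length : Int) + 2)) = "__" := by
        apply String.toList_inj.mp
        rw [PySem.Str.toList_slice, PySem.Chars.slice_eq_listSlice,
          PySem.List.slice_toNat _ (Int.natCast_nonneg _) (by omega), pvToList_uu]
        have h2n : ((m.toList.length : Int) + 2).toNat - ((m.toList.length : Int)).toNat = 2 := by
          omega
        rw [h2n, Int.toNat_natCast, hdrop]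
        rfl
      have hf : (if (PySem.Str.slice v (some (m.toList.length : Int))
            (some ((m.toList.length : Int) + 2)) == ("__" : String) &&
            PySem.Set.contains (PySem.Set.ofList ks)
              (PySem.Str.slice v none (some (m.toList.length : Int)))) = true
          then some (PySem.Str.slice v none (some (m.toList.length : Int))) else none) = some m := by
        rw [hslice2, hsliceP]
        simp [PySem.Set.contains, PySem.Set.mem_ofList, hmks]
      symm
      refine pvFindDesc _ (m.toList.length : Int) (Int.natCast_nonneg _) m hf t.length
        (PySem.Str.len v - 2) ?_ ?_
      · rw [PySem.Str.len_eq]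
        omega
      · intro j hj1 hj2
        by_cases hc : (PySem.Str.slice v (some j) (some (j + 2)) == ("__" : String) &&
            PySem.Set.contains (PySem.Set.ofList ks) (PySem.Str.slice v none (some j))) = true
        · exfalso
          rw [Bool.and_eq_true] at hc
          obtain ⟨hin, hlenj⟩ := pvCond_mem v ks j (by omega) hc.1 hc.2
          have hle := hmax _ hin
          rw [hlenj, PySem.Str.len_eq] at hle
          omega
        · exact if_neg hc
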